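-- pv_equiv track=rewrite | github.com/jraymondli/usaco-1 | 2020/February/triangles_feb20_bronze/triangles.py | find_all_combinations
-- ===== SOURCE A (Python) =====
-- def find_all_combinations(fence_posts):
--     combinations = []
--     for a in fence_posts:
--         for b in fence_posts:
--             for c in fence_posts:
--                 if (a == b or b == c or c == a):
--                     pass
--                 elif (a[0] == b[0] or b[0] == c[0] or a[0] == c[0]) and (a[1] == b[1] or b[1] == c[1] or a[1] == c[1]):
--                     combinations.append([a, b, c])
--
--     return combinations
-- ===== SOURCE B (Python) =====
-- # Faster re-implementation: index posts (with positions) by x, by y and by point;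
-- # for each ordered pair (a, b) enumerate the qualifying third points directly by
-- # merging the two relevant ordered bucket lists, instead of scanning all posts.
-- def _group(pairs):
--     d = {}
--     for k, v in pairs:
--         d.setdefault(k, []).append(v)
--     return d
--
--
-- def _merge(xs, ys):
--     res = []
--     i = j = 0
--     while i < len(xs) and j < len(ys):
--         if xs[i][0] < ys[j][0]:
--             res.append(xs[i])
--             i += 1
--         else:
--             res.append(ys[j])
--             j += 1
--     res.extend(xs[i:])
--     res.extend(ys[j:])
--     return res
--
--
-- def find_all_combinations(fence_posts):
--     en = list(enumerate(fence_posts))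
--     by_x = _group([(p[0], (i, p)) for i, p in en])
--     by_y = _group([(p[1], (i, p)) for i, p in en])
--     by_pt = _group([(p, (i, p)) for i, p in en])
--     combinations = []
--     for a in fence_posts:
--         for b in fence_posts:
--             if a == b:
--                 continue
--             if a[0] == b[0]:
--                 cands = _merge(by_y.get(a[1], []), by_y.get(b[1], []))
--             elif a[1] == b[1]:
--                 cands = _merge(by_x.get(a[0], []), by_x.get(b[0], []))
--             else:
--                 cands = _merge(by_pt.get((a[0], b[1]), []), by_pt.get((b[0], a[1]), []))
--             for _, c in cands:
--                 if c != a and c != b: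
--                     combinations.append([a, b, c])
--     return combinations
-- ===== Notes on version B (the rewrite author's own statement) =====
-- stated objective: faster
-- what changed: Instead of testing every ordered triple with a cubic triple loop, B indexes the posts (with their positions) by x, by y and by exact point once, and for each ordered pair (a,b) produces the qualifying third points directly by merging the two relevant position-ordered bucket lists.
import Mathlib
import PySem

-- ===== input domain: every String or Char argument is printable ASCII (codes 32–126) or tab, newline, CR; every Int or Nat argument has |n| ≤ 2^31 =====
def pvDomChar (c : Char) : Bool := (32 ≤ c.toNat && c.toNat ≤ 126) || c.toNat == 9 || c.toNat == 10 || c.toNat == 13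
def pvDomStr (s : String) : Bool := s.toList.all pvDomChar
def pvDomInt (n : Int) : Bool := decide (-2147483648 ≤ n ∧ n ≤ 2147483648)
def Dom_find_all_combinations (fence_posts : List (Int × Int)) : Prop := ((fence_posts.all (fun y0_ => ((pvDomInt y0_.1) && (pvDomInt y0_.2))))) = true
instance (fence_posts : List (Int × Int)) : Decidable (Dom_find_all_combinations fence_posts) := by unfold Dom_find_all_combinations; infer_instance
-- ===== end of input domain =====

-- B is faster: it indexes the posts by x, by y and by exact point once and, for each
-- ordered pair (a, b), enumerates the qualifying third points by merging two
-- position-ordered bucket lists, instead of A's cubic scan of all ordered triples.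

-- ===== PORT A =====
def find_all_combinations (fence_posts : List (Int × Int)) : List (List (Int × Int)) :=
  fence_posts.foldl (fun combinations a =>
    fence_posts.foldl (fun combinations b =>
      fence_posts.foldl (fun combinations c =>
        if a = b ∨ b = c ∨ c = a then combinations
        else if (a.1 = b.1 ∨ b.1 = c.1 ∨ a.1 = c.1) ∧ (a.2 = b.2 ∨ b.2 = c.2 ∨ a.2 = c.2) then
          combinations ++ [[a, b, c]]
        else combinations) combinations) combinations) []

-- ===== PORT B =====
-- Source B's _group: d.setdefault(k, []).append(v) over (key, value) pairs = modify with append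
def pvGroup {κ : Type} [BEq κ] (pairs : List (κ × (Int × (Int × Int)))) :
    PySem.Dict κ (List (Int × (Int × Int))) :=
  pairs.foldl (fun d p => d.modify p.1 [] (· ++ [p.2])) PySem.Dict.empty

-- Source B's _merge: two-pointer merge of two position-ordered lists
def pvMerge : List (Int × (Int × Int)) → List (Int × (Int × Int)) → List (Int × (Int × Int))
  | [], ys => ys
  | x :: xs, [] => x :: xs
  | x :: xs, y :: ys =>
    if x.1 < y.1 then x :: pvMerge xs (y :: ys) else y :: pvMerge (x :: xs) ys

def find_all_combinations_alt (fence_posts : List (Int × Int)) : List (List (Int × Int)) :=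
  let en := PySem.List.enumerate fence_posts 0
  let by_x := pvGroup (en.map (fun ip => (ip.2.1, ip)))
  let by_y := pvGroup (en.map (fun ip => (ip.2.2, ip)))
  let by_pt := pvGroup (en.map (fun ip => (ip.2, ip)))
  fence_posts.foldl (fun combinations a =>
    fence_posts.foldl (fun combinations b =>
      if a = b then combinations
      else
        let cands :=
          if a.1 = b.1 then pvMerge (by_y.getD a.2 []) (by_y.getD b.2 [])
          else if a.2 = b.2 then pvMerge (by_x.getD a.1 []) (by_x.getD b.1 [])
          else pvMerge (by_pt.getD (a.1, b.2) []) (by_pt.getD (b.1, a.2) [])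
        cands.foldl (fun combinations ic =>
          if ic.2 ≠ a ∧ ic.2 ≠ b then combinations ++ [[a, b, ic.2]] else combinations)
          combinations) combinations) []

-- ===== PRECONDITION & SPEC =====
def Spec_find_all_combinations (fence_posts : List (Int × Int)) (out : List (List (Int × Int))) : Prop := out = find_all_combinations_alt fence_posts
instance (fence_posts : List (Int × Int)) (out : List (List (Int × Int))) : Decidable (Spec_find_all_combinations fence_posts out) := by unfold Spec_find_all_combinations; infer_instance

-- ===== CLAIM (what is proved, stated in full; the proofs are below) =====
def Claim_equal_find_all_combinations : Prop := ∀ (fence_posts : List (Int × Int)), Dom_find_all_combinations fence_posts → Spec_find_all_combinations fence_posts (find_all_combinations fence_posts)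

-- ===== LEMMAS AND PROOFS =====

-- A's inner list for a fixed ordered pair (a, b)
def pvInnerA (posts : List (Int × Int)) (a b : Int × Int) : List (List (Int × Int)) :=
  (posts.filter (fun c => decide (¬(a = b ∨ b = c ∨ c = a) ∧
    ((a.1 = b.1 ∨ b.1 = c.1 ∨ a.1 = c.1) ∧ (a.2 = b.2 ∨ b.2 = c.2 ∨ a.2 = c.2))))).map
    (fun c => [a, b, c])

-- B's candidate list and inner list for a fixed ordered pair (a, b)
def pvCands (posts : List (Int × Int)) (a b : Int × Int) : List (Int × (Int × Int)) :=
  let en := PySem.List.enumerate posts 0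
  if a.1 = b.1 then
    pvMerge ((pvGroup (en.map (fun ip => (ip.2.2, ip)))).getD a.2 [])
      ((pvGroup (en.map (fun ip => (ip.2.2, ip)))).getD b.2 [])
  else if a.2 = b.2 then
    pvMerge ((pvGroup (en.map (fun ip => (ip.2.1, ip)))).getD a.1 [])
      ((pvGroup (en.map (fun ip => (ip.2.1, ip)))).getD b.1 [])
  else
    pvMerge ((pvGroup (en.map (fun ip => (ip.2, ip)))).getD (a.1, b.2) [])
      ((pvGroup (en.map (fun ip => (ip.2, ip)))).getD (b.1, a.2) [])

def pvInnerB (posts : List (Int × Int)) (a b : Int × Int) : List (List (Int × Int)) :=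
  if a = b then []
  else ((pvCands posts a b).filter (fun ic => decide (ic.2 ≠ a ∧ ic.2 ≠ b))).map
    (fun ic => [a, b, ic.2])

theorem pvMerge_nil_left (ys : List (Int × (Int × Int))) : pvMerge [] ys = ys := by
  cases ys <;> simp [pvMerge]

theorem pvMerge_nil_right (xs : List (Int × (Int × Int))) : pvMerge xs [] = xs := by
  cases xs <;> simp [pvMerge]

theorem pvMerge_filter (P Q : (Int × (Int × Int)) → Bool) (l : List (Int × (Int × Int)))
    (hl : l.Pairwise (fun p q => p.1 < q.1)) (hd : ∀ e, ¬(P e = true ∧ Q e = true)) :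
    pvMerge (l.filter P) (l.filter Q) = l.filter (fun e => P e || Q e) := by
  induction l with
  | nil => simp [pvMerge]
  | cons e t ih =>
    have he : ∀ f ∈ t, e.1 < f.1 := (List.pairwise_cons.mp hl).1
    have iht := ih (List.pairwise_cons.mp hl).2
    by_cases hP : P e = true
    · have hQ : Q e = false := by
        have := hd e
        cases h : Q e
        · rfl
        · exact absurd ⟨hP, h⟩ this
      simp only [List.filter_cons, hP, hQ, Bool.false_eq_true, if_false,
        Bool.or_eq_true, true_or, if_pos]
      cases hfq : t.filter Q with
      | nil =>
        rw [hfq] at iht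
        rw [pvMerge_nil_right] at iht
        rw [pvMerge_nil_right, iht]
      | cons y ys =>
        have hy : e.1 < y.1 :=
          he y (List.mem_of_mem_filter (show y ∈ t.filter Q by rw [hfq]; exact List.mem_cons_self))
        have step : pvMerge (e :: t.filter P) (y :: ys) = e :: pvMerge (t.filter P) (y :: ys) := by
          simp [pvMerge, hy]
        rw [step, ← hfq, iht]
    · simp only [Bool.not_eq_true] at hP
      by_cases hQ : Q e = true
      · simp only [List.filter_cons, hP, hQ, Bool.false_eq_true, if_false,
          Bool.or_eq_true, or_true, if_pos]
        cases hfp : t.filter P with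
        | nil =>
          rw [hfp] at iht
          rw [pvMerge_nil_left] at iht
          rw [pvMerge_nil_left, iht]
        | cons x xs =>
          have hx : e.1 < x.1 :=
            he x (List.mem_of_mem_filter (show x ∈ t.filter P by rw [hfp]; exact List.mem_cons_self))
          have step : pvMerge (x :: xs) (e :: t.filter Q) = e :: pvMerge (x :: xs) (t.filter Q) := by
            simp only [pvMerge, if_neg (by omega : ¬ x.1 < e.1)]
          rw [step, ← hfp, iht]
      · simp only [Bool.not_eq_true] at hQ
        simp only [List.filter_cons, hP, hQ, Bool.false_eq_true, if_false, Bool.or_self]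
        exact iht

theorem pvBucket {κ : Type} [BEq κ] [LawfulBEq κ] (posts : List (Int × Int))
    (key : (Int × (Int × Int)) → κ) (v : κ) :
    (pvGroup ((PySem.List.enumerate posts 0).map (fun ip => (key ip, ip)))).getD v []
      = (PySem.List.enumerate posts 0).filter (fun ip => key ip == v) := by
  unfold pvGroup
  rw [PySem.Dict.getD_foldl_modify_append, List.filter_map, List.map_map]
  simp [Function.comp_def]

theorem pvFilterEnum (posts : List (Int × Int)) (R : (Int × Int) → Bool)
    (f : (Int × Int) → List (Int × Int)) :
    ((PySem.List.enumerate posts 0).filter (fun ip => R ip.2)).map (fun ip => f ip.2)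
      = (posts.filter R).map f := by
  conv_rhs => rw [← PySem.List.map_snd_enumerate posts 0]
  rw [List.filter_map, List.map_map]
  rfl

theorem pvA_eq_flatMap (posts : List (Int × Int)) :
    find_all_combinations posts =
      posts.flatMap (fun a => posts.flatMap (fun b => pvInnerA posts a b)) := by
  unfold find_all_combinations
  have inner : ∀ (a b : Int × Int) (acc : List (List (Int × Int))),
      posts.foldl (fun combinations c =>
        if a = b ∨ b = c ∨ c = a then combinations
        else if (a.1 = b.1 ∨ b.1 = c.1 ∨ a.1 = c.1) ∧ (a.2 = b.2 ∨ b.2 = c.2 ∨ a.2 = c.2) then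
          combinations ++ [[a, b, c]]
        else combinations) acc = acc ++ pvInnerA posts a b := by
    intro a b acc
    rw [PySem.List.foldl_congr_mem' posts _
      (fun acc c => if decide (¬(a = b ∨ b = c ∨ c = a) ∧
        ((a.1 = b.1 ∨ b.1 = c.1 ∨ a.1 = c.1) ∧ (a.2 = b.2 ∨ b.2 = c.2 ∨ a.2 = c.2))) = true
        then acc ++ [[a, b, c]] else acc) acc
      (by
        intro c _ acc'
        by_cases h1 : a = b ∨ b = c ∨ c = a <;>
          by_cases h2 : (a.1 = b.1 ∨ b.1 = c.1 ∨ a.1 = c.1) ∧ (a.2 = b.2 ∨ b.2 = c.2 ∨ a.2 = c.2) <;>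
          simp [h1, h2])]
    exact PySem.List.foldl_append_if _ _ posts acc
  have mid : ∀ (a : Int × Int) (acc : List (List (Int × Int))),
      posts.foldl (fun combinations b =>
        posts.foldl (fun combinations c =>
          if a = b ∨ b = c ∨ c = a then combinations
          else if (a.1 = b.1 ∨ b.1 = c.1 ∨ a.1 = c.1) ∧ (a.2 = b.2 ∨ b.2 = c.2 ∨ a.2 = c.2) then
            combinations ++ [[a, b, c]]
          else combinations) combinations) acc
      = acc ++ posts.flatMap (fun b => pvInnerA posts a b) := by
    intro a acc
    rw [PySem.List.foldl_congr_mem' posts _ (fun acc b => acc ++ pvInnerA posts a b) acc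
      (fun b _ acc' => inner a b acc')]
    exact PySem.List.foldl_append_eq_flatMap _ posts acc
  rw [PySem.List.foldl_congr_mem' posts _
    (fun acc a => acc ++ posts.flatMap (fun b => pvInnerA posts a b)) []
    (fun a _ acc' => mid a acc')]
  rw [PySem.List.foldl_append_eq_flatMap]
  simp

theorem pvB_eq_flatMap (posts : List (Int × Int)) :
    find_all_combinations_alt posts =
      posts.flatMap (fun a => posts.flatMap (fun b => pvInnerB posts a b)) := by
  unfold find_all_combinations_alt
  simp only []
  show posts.foldl (fun combinations a =>
      posts.foldl (fun combinations b =>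
        if a = b then combinations
        else
          (pvCands posts a b).foldl (fun combinations ic =>
            if ic.2 ≠ a ∧ ic.2 ≠ b then combinations ++ [[a, b, ic.2]] else combinations)
            combinations) combinations) [] = _
  have inner : ∀ (a b : Int × Int) (acc : List (List (Int × Int))),
      (if a = b then acc
       else
        (pvCands posts a b).foldl (fun combinations ic =>
          if ic.2 ≠ a ∧ ic.2 ≠ b then combinations ++ [[a, b, ic.2]] else combinations) acc)
      = acc ++ pvInnerB posts a b := by
    intro a b acc
    by_cases hab : a = b
    · simp [hab, pvInnerB]
    · rw [if_neg hab, pvInnerB, if_neg hab]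
      rw [PySem.List.foldl_congr_mem' (pvCands posts a b) _
        (fun acc ic => if decide (ic.2 ≠ a ∧ ic.2 ≠ b) = true then acc ++ [[a, b, ic.2]] else acc)
        acc (by intro ic _ acc'; by_cases h : ic.2 ≠ a ∧ ic.2 ≠ b <;> simp [h])]
      exact PySem.List.foldl_append_if _ _ (pvCands posts a b) acc
  have mid : ∀ (a : Int × Int) (acc : List (List (Int × Int))),
      posts.foldl (fun combinations b =>
        if a = b then combinations
        else
          (pvCands posts a b).foldl (fun combinations ic =>
            if ic.2 ≠ a ∧ ic.2 ≠ b then combinations ++ [[a, b, ic.2]] else combinations)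
            combinations) acc
      = acc ++ posts.flatMap (fun b => pvInnerB posts a b) := by
    intro a acc
    rw [PySem.List.foldl_congr_mem' posts _ (fun acc b => acc ++ pvInnerB posts a b) acc
      (fun b _ acc' => inner a b acc')]
    exact PySem.List.foldl_append_eq_flatMap _ posts acc
  rw [PySem.List.foldl_congr_mem' posts _
    (fun acc a => acc ++ posts.flatMap (fun b => pvInnerB posts a b)) []
    (fun a _ acc' => mid a acc')]
  rw [PySem.List.foldl_append_eq_flatMap]
  simp

theorem pvInner_eq (posts : List (Int × Int)) (a b : Int × Int) :
    pvInnerA posts a b = pvInnerB posts a b := by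
  by_cases hab : a = b
  · simp [pvInnerA, pvInnerB, hab]
  · have hab' : ¬(a.1 = b.1 ∧ a.2 = b.2) := fun h => hab (Prod.ext_iff.mpr h)
    rw [pvInnerB, if_neg hab, pvCands]
    by_cases h1 : a.1 = b.1
    · rw [if_pos h1, pvBucket posts (fun ip => ip.2.2) a.2, pvBucket posts (fun ip => ip.2.2) b.2,
        pvMerge_filter _ _ _ (PySem.List.pairwise_lt_enumerate posts 0)
          (by intro e ⟨hp, hq⟩; simp only [beq_iff_eq] at hp hq; exact hab' ⟨h1, by omega⟩),
        List.filter_filter,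
        pvFilterEnum posts (fun c => decide (c ≠ a ∧ c ≠ b) && (c.2 == a.2 || c.2 == b.2))
          (fun c => [a, b, c]), pvInnerA]
      congr 1
      refine List.filter_congr (fun c _ => ?_)
      rw [Bool.eq_iff_iff]
      simp only [Bool.and_eq_true, Bool.or_eq_true, beq_iff_eq, decide_eq_true_eq, ne_eq,
        Prod.ext_iff]
      omega
    · by_cases h2 : a.2 = b.2
      · rw [if_neg h1, if_pos h2, pvBucket posts (fun ip => ip.2.1) a.1,
          pvBucket posts (fun ip => ip.2.1) b.1,
          pvMerge_filter _ _ _ (PySem.List.pairwise_lt_enumerate posts 0)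
            (by intro e ⟨hp, hq⟩; simp only [beq_iff_eq] at hp hq; exact h1 (by omega)),
          List.filter_filter,
          pvFilterEnum posts (fun c => decide (c ≠ a ∧ c ≠ b) && (c.1 == a.1 || c.1 == b.1))
            (fun c => [a, b, c]), pvInnerA]
        congr 1
        refine List.filter_congr (fun c _ => ?_)
        rw [Bool.eq_iff_iff]
        simp only [Bool.and_eq_true, Bool.or_eq_true, beq_iff_eq, decide_eq_true_eq, ne_eq,
          Prod.ext_iff]
        omega
      · rw [if_neg h1, if_neg h2, pvBucket posts (fun ip => ip.2) (a.1, b.2),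
          pvBucket posts (fun ip => ip.2) (b.1, a.2),
          pvMerge_filter _ _ _ (PySem.List.pairwise_lt_enumerate posts 0)
            (by
              intro e ⟨hp, hq⟩
              simp only [beq_iff_eq, Prod.ext_iff] at hp hq
              exact h1 (by omega)),
          List.filter_filter,
          pvFilterEnum posts
            (fun c => decide (c ≠ a ∧ c ≠ b) && (c == (a.1, b.2) || c == (b.1, a.2)))
            (fun c => [a, b, c]), pvInnerA]
        congr 1
        refine List.filter_congr (fun c _ => ?_)
        rw [Bool.eq_iff_iff]
        simp only [Bool.and_eq_true, Bool.or_eq_true, beq_iff_eq, decide_eq_true_eq, ne_eq,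
          Prod.ext_iff]
        omega

-- ===== VERDICT (by name: the statement is the Claim_ definition above) =====
theorem find_all_combinations_spec : Claim_equal_find_all_combinations := by
  intro posts _
  unfold Spec_find_all_combinations
  rw [pvA_eq_flatMap, pvB_eq_flatMap]
  simp only [pvInner_eq]
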